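-- pv_equiv track=rewrite | github.com/kodevadam/Pak | pak/c2pak/c_preprocess.py | capture_comments
-- ===== SOURCE A (Python) =====
-- from typing import Dict, List, Optional, Tuple
--
-- def capture_comments(source: str) -> List[Tuple[int, str]]:
--     """Capture C comments and return list of (line_number, text) tuples.
--
--     Captures both block comments /* ... */ and line comments // ...
--     Line numbers are 1-based.
--     """
--     comments = []
--     i = 0
--     n = len(source)
--     line_num = 1
--
--     while i < n:
--         # Block comment
--         if source[i] == '/' and i + 1 < n and source[i + 1] == '*':
--             start_line = line_num
--             i += 2
--             text_parts = ['/*']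
--             while i < n:
--                 if source[i] == '*' and i + 1 < n and source[i + 1] == '/':
--                     text_parts.append('*/')
--                     i += 2
--                     break
--                 elif source[i] == '\n':
--                     line_num += 1
--                     text_parts.append('\n')
--                 else:
--                     text_parts.append(source[i])
--                 i += 1
--             text = ''.join(text_parts)
--             # Extract just the content
--             content = text[2:-2].strip() if text.endswith('*/') else text[2:].strip()
--             comments.append((start_line, '-- ' + content.replace('\n', ' ')))
--         # Line comment
--         elif source[i] == '/' and i + 1 < n and source[i + 1] == '/':
--             start_line = line_num
--             i += 2
--             text_parts = []
--             while i < n and source[i] != '\n':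
--                 text_parts.append(source[i])
--                 i += 1
--             content = ''.join(text_parts).strip()
--             comments.append((start_line, '-- ' + content))
--         elif source[i] == '"':
--             # Skip string literal
--             i += 1
--             while i < n:
--                 if source[i] == '\\' and i + 1 < n:
--                     i += 2
--                 elif source[i] == '"':
--                     i += 1
--                     break
--                 else:
--                     if source[i] == '\n':
--                         line_num += 1
--                     i += 1
--         elif source[i] == '\n':
--             line_num += 1
--             i += 1
--         else:
--             i += 1
--     return comments
-- ===== SOURCE B (Python) =====
-- def _emit_block(start, buf, out):
--     text = ''.join(buf)
--     content = text[2:-2] if text.endswith('*/') else text[2:]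
--     out.append((start, '-- ' + content.strip().replace('\n', ' ')))
--
--
-- def capture_comments(source):
--     """Capture C comments as (1-based line, text) pairs.
--
--     Single flat pass with an explicit mode automaton over (char, lookahead)
--     pairs, instead of nested index-based scanning loops.
--     """
--     out = []
--     CODE, BLOCK, STR, LINE = 0, 1, 2, 3
--     mode = CODE
--     line = 1
--     start = 0
--     buf = []
--     skip = False
--     for c, nxt in zip(source, list(source[1:]) + ['']):
--         if skip:
--             skip = False
--         elif mode == CODE:
--             if c == '/' and nxt == '*':
--                 mode, start, buf, skip = BLOCK, line, ['/', '*'], True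
--             elif c == '/' and nxt == '/':
--                 mode, start, buf, skip = LINE, line, [], True
--             elif c == '"':
--                 mode = STR
--             elif c == '\n':
--                 line += 1
--         elif mode == BLOCK:
--             if c == '*' and nxt == '/':
--                 _emit_block(start, buf + ['*', '/'], out)
--                 mode, skip = CODE, True
--             else:
--                 if c == '\n':
--                     line += 1
--                 buf.append(c)
--         elif mode == STR:
--             if c == '\\' and nxt != '':
--                 skip = True
--             elif c == '"':
--                 mode = CODE
--             elif c == '\n':
--                 line += 1
--         else:  # LINE
--             if c == '\n':
--                 out.append((start, '-- ' + ''.join(buf).strip()))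
--                 mode = CODE
--                 line += 1
--             else:
--                 buf.append(c)
--     if mode == BLOCK:
--         _emit_block(start, buf, out)
--     elif mode == LINE:
--         out.append((start, '-- ' + ''.join(buf).strip()))
--     return out
-- ===== Notes on version B (the rewrite author's own statement) =====
-- stated objective: alternative
-- what changed: Replaces A's outer while-loop with three nested index-based inner scanning loops by a single flat pass of an explicit four-mode automaton (code/block-comment/string/line-comment) over (char, lookahead) pairs with a skip flag; line counting, comment buffering and emission happen in the one loop.
import Mathlib
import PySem

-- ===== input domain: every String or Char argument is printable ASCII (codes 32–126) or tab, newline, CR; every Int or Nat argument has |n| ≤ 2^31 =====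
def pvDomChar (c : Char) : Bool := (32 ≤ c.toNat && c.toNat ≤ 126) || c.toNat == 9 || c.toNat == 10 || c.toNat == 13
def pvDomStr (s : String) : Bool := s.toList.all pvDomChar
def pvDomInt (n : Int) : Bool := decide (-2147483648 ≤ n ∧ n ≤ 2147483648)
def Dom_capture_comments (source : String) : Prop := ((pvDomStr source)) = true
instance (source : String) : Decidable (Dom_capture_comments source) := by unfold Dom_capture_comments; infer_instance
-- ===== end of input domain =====

-- B re-implements A's nested index-based scanning loops as one flat pass of an
-- explicit mode automaton over (char, lookahead) pairs; same return value, no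
-- side effects in either version.

-- ===== PORT A =====
-- inner 'while' of the block-comment branch: returns (text_parts, line_num, remaining source)
def aBlockLoop : List Char → Int → List (List Char) → (List (List Char) × Int × List Char)
  | [], line, parts => (parts, line, [])
  | c :: rest, line, parts =>
    if c = '*' ∧ rest.head? = some '/' then
      (parts ++ [['*', '/']], line, rest.tail)
    else if c = '\n' then aBlockLoop rest (line + 1) (parts ++ [['\n']])
    else aBlockLoop rest line (parts ++ [[c]])

-- inner 'while' of the line-comment branch: returns (text_parts, remaining source incl. the '\n')
def aLineLoop : List Char → List Char → (List Char × List Char)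
  | [], parts => (parts, [])
  | c :: rest, parts => if c = '\n' then (parts, c :: rest) else aLineLoop rest (parts ++ [c])

-- inner 'while' of the string-literal branch: returns (line_num, remaining source)
def aStrLoop : List Char → Int → (Int × List Char)
  | [], line => (line, [])
  | c :: rest, line =>
    if c = '\\' ∧ rest ≠ [] then aStrLoop rest.tail line
    else if c = '"' then (line, rest)
    else if c = '\n' then aStrLoop rest (line + 1)
    else aStrLoop rest line
termination_by cs _ => cs.length
decreasing_by all_goals simp [List.length_tail]

-- "'-- ' + (text[2:-2] if … else text[2:]).strip().replace('\n',' ')" of A's block branch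
def aFmtBlock (text : List Char) : String :=
  let content := if PySem.Chars.endswith text ['*', '/'] then
      PySem.Chars.strip (PySem.List.slice text (some 2) (some (-2)))
    else PySem.Chars.strip (PySem.List.slice text (some 2) none)
  String.ofList (['-', '-', ' '] ++ PySem.Chars.replace content ['\n'] [' '])

-- length bounds on the inner loops, used only for aOuterLoop's termination
theorem aBlockLoop_len : ∀ (cs : List Char) (line : Int) (parts : List (List Char)),
    (aBlockLoop cs line parts).2.2.length ≤ cs.length := by
  intro cs
  induction cs with
  | nil => intro line parts; simp [aBlockLoop]
  | cons c rest ih =>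
    intro line parts
    simp only [aBlockLoop]
    split
    · simpa [List.length_tail] using Nat.sub_le rest.length 0|>.trans (by omega)
    · split
      · exact (ih _ _).trans (by simp)
      · exact (ih _ _).trans (by simp)

theorem aLineLoop_len : ∀ (cs : List Char) (parts : List Char),
    (aLineLoop cs parts).2.length ≤ cs.length := by
  intro cs
  induction cs with
  | nil => intro parts; simp [aLineLoop]
  | cons c rest ih =>
    intro parts
    simp only [aLineLoop]
    split
    · simp
    · exact (ih _).trans (by simp)

theorem aStrLoop_len : ∀ (n : Nat) (cs : List Char), cs.length ≤ n → ∀ (line : Int),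
    (aStrLoop cs line).2.length ≤ cs.length := by
  intro n
  induction n with
  | zero =>
    intro cs h line
    have : cs = [] := List.length_eq_zero_iff.mp (Nat.le_zero.mp h)
    subst this; simp [aStrLoop]
  | succ n ih =>
    intro cs h line
    match cs with
    | [] => simp [aStrLoop]
    | c :: rest =>
      simp only [aStrLoop]
      split_ifs with h1 h2 h3
      · have ht : rest.tail.length ≤ n := by simp [List.length_tail] at *; omega
        exact (ih _ ht _).trans (by simp [List.length_tail]; omega)
      · simp
      · have hr : rest.length ≤ n := by simp at h; omega
        exact (ih _ hr _).trans (by simp)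
      · have hr : rest.length ≤ n := by simp at h; omega
        exact (ih _ hr _).trans (by simp)

-- the outer 'while i < n' of A
def aOuterLoop : List Char → Int → List (Int × String) → List (Int × String)
  | [], _, acc => acc
  | c :: rest, line, acc =>
    if c = '/' ∧ rest.head? = some '*' then
      let r := aBlockLoop rest.tail line [['/', '*']]
      aOuterLoop r.2.2 r.2.1 (acc ++ [(line, aFmtBlock (PySem.Chars.join [] r.1))])
    else if c = '/' ∧ rest.head? = some '/' then
      let r := aLineLoop rest.tail []
      aOuterLoop r.2 line (acc ++ [(line, String.ofList (['-', '-', ' '] ++ PySem.Chars.strip r.1))])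
    else if c = '"' then
      let r := aStrLoop rest line
      aOuterLoop r.2 r.1 acc
    else if c = '\n' then aOuterLoop rest (line + 1) acc
    else aOuterLoop rest line acc
termination_by cs _ _ => cs.length
decreasing_by
  · exact Nat.lt_succ_of_le ((aBlockLoop_len _ _ _).trans (by simp [List.length_tail]))
  · exact Nat.lt_succ_of_le ((aLineLoop_len _ _).trans (by simp [List.length_tail]))
  · exact Nat.lt_succ_of_le (aStrLoop_len _ _ (le_refl _) _)
  · simp
  · simp

def capture_comments (source : String) : List (Int × String) :=
  aOuterLoop source.toList 1 []

-- ===== PORT B =====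
inductive BMode : Type
  | code : BMode
  | block : Int → List Char → BMode
  | strlit : BMode
  | lineC : Int → List Char → BMode
deriving DecidableEq, Repr

-- zip(source, list(source[1:]) + ['']) — the '' sentinel is `none`
def bPairs : List Char → List (Char × Option Char)
  | [] => []
  | c :: rest => (c, rest.head?) :: bPairs rest

-- _emit_block of Source B (''.join on a list of single chars is the char list itself)
def bEmitBlock (start : Int) (buf : List Char) (out : List (Int × String)) : List (Int × String) :=
  let content := if PySem.Chars.endswith buf ['*', '/'] then PySem.List.slice buf (some 2) (some (-2))
    else PySem.List.slice buf (some 2) none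
  out ++ [(start, String.ofList (['-', '-', ' '] ++ PySem.Chars.replace (PySem.Chars.strip content) ['\n'] [' ']))]

-- the single 'for c, nxt in …' pass of Source B, plus the end-of-input flush
def bRun : List (Char × Option Char) → BMode → Bool → Int → List (Int × String) → List (Int × String)
  | [], mode, _, _, out =>
    match mode with
    | .block s buf => bEmitBlock s buf out
    | .lineC s buf => out ++ [(s, String.ofList (['-', '-', ' '] ++ PySem.Chars.strip buf))]
    | _ => out
  | p :: ps, mode, skip, line, out =>
    if skip then bRun ps mode false line out
    else
      match mode with
      | .code =>
        if p.1 = '/' ∧ p.2 = some '*' then bRun ps (.block line ['/', '*']) true line out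
        else if p.1 = '/' ∧ p.2 = some '/' then bRun ps (.lineC line []) true line out
        else if p.1 = '"' then bRun ps .strlit false line out
        else if p.1 = '\n' then bRun ps .code false (line + 1) out
        else bRun ps .code false line out
      | .block s buf =>
        if p.1 = '*' ∧ p.2 = some '/' then bRun ps .code true line (bEmitBlock s (buf ++ ['*', '/']) out)
        else if p.1 = '\n' then bRun ps (.block s (buf ++ ['\n'])) false (line + 1) out
        else bRun ps (.block s (buf ++ [p.1])) false line out
      | .strlit =>
        if p.1 = '\\' ∧ p.2 ≠ none then bRun ps .strlit true line out
        else if p.1 = '"' then bRun ps .code false line out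
        else if p.1 = '\n' then bRun ps .strlit false (line + 1) out
        else bRun ps .strlit false line out
      | .lineC s buf =>
        if p.1 = '\n' then bRun ps .code false (line + 1) (out ++ [(s, String.ofList (['-', '-', ' '] ++ PySem.Chars.strip buf))])
        else bRun ps (.lineC s (buf ++ [p.1])) false line out

def capture_comments_alt (source : String) : List (Int × String) :=
  bRun (bPairs source.toList) .code false 1 []

-- ===== PRECONDITION & SPEC =====
def Spec_capture_comments (source : String) (out : List (Int × String)) : Prop := out = capture_comments_alt source
instance (source : String) (out : List (Int × String)) : Decidable (Spec_capture_comments source out) := by unfold Spec_capture_comments; infer_instance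

-- ===== CLAIM (what is proved, stated in full; the proofs are below) =====
def Claim_equal_capture_comments : Prop := ∀ (source : String), Dom_capture_comments source → Spec_capture_comments source (capture_comments source)

-- ===== LEMMAS AND PROOFS =====

theorem join_nil_eq_flatten (parts : List (List Char)) : PySem.Chars.join [] parts = parts.flatten := by
  induction parts with
  | nil => rfl
  | cons p rest ih =>
    cases rest with
    | nil => simp [PySem.Chars.join, List.intercalate]
    | cons q t =>
      rw [show PySem.Chars.join [] (p :: q :: t) = p ++ PySem.Chars.join [] (q :: t) by
        simp [PySem.Chars.join, List.intercalate], ih]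
      simp

theorem bRun_skip (p : Char × Option Char) (ps : List (Char × Option Char)) (m : BMode)
    (line : Int) (out : List (Int × String)) :
    bRun (p :: ps) m true line out = bRun ps m false line out := by
  simp [bRun]

theorem emit_eq (s : Int) (buf : List Char) (out : List (Int × String)) :
    bEmitBlock s buf out = out ++ [(s, aFmtBlock buf)] := by
  unfold bEmitBlock aFmtBlock
  split <;> rfl

theorem block_lemma : ∀ (cs : List Char) (line s : Int) (parts : List (List Char))
    (acc : List (Int × String)),
    bRun (bPairs cs) (.block s parts.flatten) false line acc
      = bRun (bPairs (aBlockLoop cs line parts).2.2) .code false (aBlockLoop cs line parts).2.1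
          (acc ++ [(s, aFmtBlock (PySem.Chars.join [] (aBlockLoop cs line parts).1))]) := by
  intro cs
  induction cs with
  | nil =>
    intro line s parts acc
    simp [aBlockLoop, bPairs, bRun, emit_eq, join_nil_eq_flatten]
  | cons c rest ih =>
    intro line s parts acc
    by_cases h1 : c = '*' ∧ rest.head? = some '/'
    · obtain ⟨hc, hr⟩ := h1
      subst hc
      cases rest with
      | nil => simp at hr
      | cons d rest' =>
        have hd : d = '/' := by simpa using hr
        subst hd
        rw [show aBlockLoop ('*' :: '/' :: rest') line parts = (parts ++ [['*', '/']], line, rest')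
          by simp [aBlockLoop]]
        rw [show bPairs ('*' :: '/' :: rest') = ('*', some '/') :: ('/', rest'.head?) :: bPairs rest'
          from rfl]
        rw [show bRun (('*', some '/') :: ('/', rest'.head?) :: bPairs rest')
              (.block s parts.flatten) false line acc
            = bRun (('/', rest'.head?) :: bPairs rest') .code true line
                (bEmitBlock s (parts.flatten ++ ['*', '/']) acc) by simp [bRun]]
        rw [bRun_skip, emit_eq, join_nil_eq_flatten]
        simp
    · by_cases h2 : c = '\n'
      · subst h2
        rw [show aBlockLoop ('\n' :: rest) line parts = aBlockLoop rest (line + 1) (parts ++ [['\n']])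
          by simp [aBlockLoop]]
        rw [show bPairs ('\n' :: rest) = ('\n', rest.head?) :: bPairs rest from rfl]
        rw [show bRun (('\n', rest.head?) :: bPairs rest) (.block s parts.flatten) false line acc
            = bRun (bPairs rest) (.block s (parts.flatten ++ ['\n'])) false (line + 1) acc
          by simp [bRun]]
        have h3 := ih (line + 1) s (parts ++ [['\n']]) acc
        simpa using h3
      · rw [show aBlockLoop (c :: rest) line parts = aBlockLoop rest line (parts ++ [[c]])
          by simp [aBlockLoop, h1, h2]]
        rw [show bPairs (c :: rest) = (c, rest.head?) :: bPairs rest from rfl]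
        rw [show bRun ((c, rest.head?) :: bPairs rest) (.block s parts.flatten) false line acc
            = bRun (bPairs rest) (.block s (parts.flatten ++ [c])) false line acc
          by simp [bRun, h1, h2]]
        have h3 := ih line s (parts ++ [[c]]) acc
        simpa using h3

theorem line_lemma : ∀ (cs : List Char) (buf : List Char) (s line : Int)
    (acc : List (Int × String)),
    bRun (bPairs cs) (.lineC s buf) false line acc
      = bRun (bPairs (aLineLoop cs buf).2) .code false line
          (acc ++ [(s, String.ofList (['-', '-', ' '] ++ PySem.Chars.strip (aLineLoop cs buf).1))]) := by
  intro cs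
  induction cs with
  | nil => intro buf s line acc; simp [aLineLoop, bPairs, bRun]
  | cons c rest ih =>
    intro buf s line acc
    by_cases hc : c = '\n'
    · subst hc
      rw [show aLineLoop ('\n' :: rest) buf = (buf, '\n' :: rest) by simp [aLineLoop]]
      simp [bPairs, bRun]
    · rw [show aLineLoop (c :: rest) buf = aLineLoop rest (buf ++ [c]) by simp [aLineLoop, hc]]
      rw [show bPairs (c :: rest) = (c, rest.head?) :: bPairs rest from rfl]
      rw [show bRun ((c, rest.head?) :: bPairs rest) (.lineC s buf) false line acc
          = bRun (bPairs rest) (.lineC s (buf ++ [c])) false line acc by simp [bRun, hc]]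
      exact ih (buf ++ [c]) s line acc

theorem str_lemma : ∀ (n : Nat) (cs : List Char), cs.length ≤ n → ∀ (line : Int) (acc : List (Int × String)),
    bRun (bPairs cs) .strlit false line acc
      = bRun (bPairs (aStrLoop cs line).2) .code false (aStrLoop cs line).1 acc := by
  intro n
  induction n with
  | zero =>
    intro cs h line acc
    have : cs = [] := List.length_eq_zero_iff.mp (Nat.le_zero.mp h)
    subst this; simp [aStrLoop, bPairs, bRun]
  | succ n ih =>
    intro cs h line acc
    match cs with
    | [] => simp [aStrLoop, bPairs, bRun]
    | c :: rest =>
      by_cases h1 : c = '\\' ∧ rest ≠ []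
      · obtain ⟨hc, hr⟩ := h1
        match rest, hr with
        | d :: rest', _ =>
          subst hc
          rw [show bPairs ('\\' :: d :: rest') = ('\\', some d) :: bPairs (d :: rest') from rfl]
          rw [show bRun (('\\', some d) :: bPairs (d :: rest')) .strlit false line acc
              = bRun (bPairs (d :: rest')) .strlit true line acc by simp [bRun]]
          rw [show bPairs (d :: rest') = (d, rest'.head?) :: bPairs rest' from rfl, bRun_skip]
          rw [show aStrLoop ('\\' :: d :: rest') line = aStrLoop rest' line by simp [aStrLoop]]
          exact ih rest' (by simp at h; omega) line acc
      · have h1' : ¬(c = '\\' ∧ rest.head? ≠ none) := by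
          simpa [List.head?_eq_none_iff] using h1
        rw [show bPairs (c :: rest) = (c, rest.head?) :: bPairs rest from rfl]
        by_cases h2 : c = '\"'
        · subst h2
          rw [show aStrLoop ('\"' :: rest) line = (line, rest) by simp [aStrLoop]]
          simp [bRun]
        · by_cases h3 : c = '\n'
          · subst h3
            rw [show aStrLoop ('\n' :: rest) line = aStrLoop rest (line + 1) by simp [aStrLoop]]
            rw [show bRun (('\n', rest.head?) :: bPairs rest) .strlit false line acc
                = bRun (bPairs rest) .strlit false (line + 1) acc by simp [bRun]]
            exact ih rest (by simp at h; omega) (line + 1) acc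
          · rw [show aStrLoop (c :: rest) line = aStrLoop rest line by simp [aStrLoop, h1, h2, h3]]
            rw [show bRun ((c, rest.head?) :: bPairs rest) .strlit false line acc
                = bRun (bPairs rest) .strlit false line acc by
                  simp [bRun, h2, h3]
                  intro hc hr
                  exact absurd ⟨hc, hr⟩ h1]
            exact ih rest (by simp at h; omega) line acc

theorem main_lemma : ∀ (n : Nat) (cs : List Char), cs.length ≤ n →
    ∀ (line : Int) (acc : List (Int × String)),
    aOuterLoop cs line acc = bRun (bPairs cs) .code false line acc := by
  intro n
  induction n with
  | zero =>
    intro cs h line acc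
    have : cs = [] := List.length_eq_zero_iff.mp (Nat.le_zero.mp h)
    subst this; simp [aOuterLoop, bPairs, bRun]
  | succ n ih =>
    intro cs h line acc
    match cs with
    | [] => simp [aOuterLoop, bPairs, bRun]
    | c :: rest =>
      by_cases hB : c = '/' ∧ rest.head? = some '*'
      · obtain ⟨hc, hr⟩ := hB
        subst hc
        cases rest with
        | nil => simp at hr
        | cons d rest2 =>
          have hd : d = '*' := by simpa using hr
          subst hd
          rw [show aOuterLoop ('/' :: '*' :: rest2) line acc
              = aOuterLoop (aBlockLoop rest2 line [['/', '*']]).2.2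
                  (aBlockLoop rest2 line [['/', '*']]).2.1
                  (acc ++ [(line, aFmtBlock (PySem.Chars.join [] (aBlockLoop rest2 line [['/', '*']]).1))])
            by simp [aOuterLoop]]
          rw [ih _ (le_trans (aBlockLoop_len _ _ _) (by simp at h; omega)) _ _]
          rw [show bPairs ('/' :: '*' :: rest2) = ('/', some '*') :: ('*', rest2.head?) :: bPairs rest2
            from rfl]
          rw [show bRun (('/', some '*') :: ('*', rest2.head?) :: bPairs rest2) .code false line acc
              = bRun (('*', rest2.head?) :: bPairs rest2) (.block line ['/', '*']) true line acc
            by simp [bRun]]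
          rw [bRun_skip]
          have hbl := block_lemma rest2 line line [['/', '*']] acc
          simp only [List.flatten_cons, List.flatten_nil, List.append_nil] at hbl
          rw [hbl]
      · by_cases hL : c = '/' ∧ rest.head? = some '/'
        · obtain ⟨hc, hr⟩ := hL
          subst hc
          cases rest with
          | nil => simp at hr
          | cons d rest2 =>
            have hd : d = '/' := by simpa using hr
            subst hd
            rw [show aOuterLoop ('/' :: '/' :: rest2) line acc
                = aOuterLoop (aLineLoop rest2 []).2 line
                    (acc ++ [(line, String.ofList (['-', '-', ' '] ++ PySem.Chars.strip (aLineLoop rest2 []).1))])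
              by simp [aOuterLoop]]
            rw [ih _ (le_trans (aLineLoop_len _ _) (by simp at h; omega)) _ _]
            rw [show bPairs ('/' :: '/' :: rest2) = ('/', some '/') :: ('/', rest2.head?) :: bPairs rest2
              from rfl]
            rw [show bRun (('/', some '/') :: ('/', rest2.head?) :: bPairs rest2) .code false line acc
                = bRun (('/', rest2.head?) :: bPairs rest2) (.lineC line []) true line acc
              by simp [bRun]]
            rw [bRun_skip]
            rw [line_lemma]
        · by_cases hS : c = '"'
          · subst hS
            rw [show aOuterLoop ('"' :: rest) line acc
                = aOuterLoop (aStrLoop rest line).2 (aStrLoop rest line).1 acc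
              by simp [aOuterLoop]]
            rw [ih _ (le_trans (aStrLoop_len rest.length rest (le_refl _) line) (by simp at h; omega)) _ _]
            rw [show bPairs ('"' :: rest) = ('"', rest.head?) :: bPairs rest from rfl]
            rw [show bRun (('"', rest.head?) :: bPairs rest) .code false line acc
                = bRun (bPairs rest) .strlit false line acc by simp [bRun]]
            rw [str_lemma rest.length rest (le_refl _) line acc]
          · by_cases hN : c = '\n'
            · subst hN
              rw [show aOuterLoop ('\n' :: rest) line acc = aOuterLoop rest (line + 1) acc
                by simp [aOuterLoop]]
              rw [ih _ (by simp at h; omega) _ _]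
              rw [show bPairs ('\n' :: rest) = ('\n', rest.head?) :: bPairs rest from rfl]
              rw [show bRun (('\n', rest.head?) :: bPairs rest) .code false line acc
                  = bRun (bPairs rest) .code false (line + 1) acc by simp [bRun]]
            · rw [show aOuterLoop (c :: rest) line acc = aOuterLoop rest line acc
                by simp [aOuterLoop, hB, hL, hS, hN]]
              rw [ih _ (by simp at h; omega) _ _]
              rw [show bPairs (c :: rest) = (c, rest.head?) :: bPairs rest from rfl]
              rw [show bRun ((c, rest.head?) :: bPairs rest) .code false line acc
                  = bRun (bPairs rest) .code false line acc by simp [bRun, hB, hL, hS, hN]]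

-- ===== VERDICT (by name: the statement is the Claim_ definition above) =====
theorem capture_comments_spec : Claim_equal_capture_comments := by
  intro source _
  unfold Spec_capture_comments capture_comments capture_comments_alt
  exact main_lemma source.toList.length source.toList (le_refl _) 1 []
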